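-- pv_equiv track=rewrite | github.com/MrBrantCode/unitest_baseline | mut_generate/mist_train_cf/cf_21005/solution.py | backtrack
-- ===== SOURCE A (Python) =====
-- def backtrack(permutation, unused, n):
--     if len(permutation) == n:
--         return 1
--
--     count = 0
--     for element in unused:
--         if len(permutation) == 0 or element > permutation[-1]:
--             new_permutation = permutation + [element]
--             new_unused = unused.copy()
--             new_unused.remove(element)
--             count += backtrack(new_permutation, new_unused, n)
--
--     return count
-- ===== SOURCE B (Python) =====
-- def backtrack(permutation, unused, n):
--     # DP over sorted distinct candidate values instead of exponential backtracking.
--     k = n - len(permutation)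
--     if k < 0:
--         return 0
--     last = permutation[-1] if permutation else None
--     counts = {}
--     for v in unused:
--         if last is None or v > last:
--             counts[v] = counts.get(v, 0) + 1
--     vals = sorted(counts)
--     memo = {}
--     def count_from(i, t):
--         # number of strictly increasing length-t sequences drawn from vals[i:],
--         # weighted by multiplicities
--         if t == 0:
--             return 1
--         if i == len(vals):
--             return 0
--         if (i, t) not in memo:
--             memo[(i, t)] = count_from(i + 1, t) + counts[vals[i]] * count_from(i + 1, t - 1)
--         return memo[(i, t)]
--     return count_from(0, k)
-- ===== Notes on version B (the rewrite author's own statement) =====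
-- stated objective: faster
-- what changed: Replaced the exponential backtracking enumeration of all strictly increasing sequences by a memoized DP over the sorted distinct candidate values with multiplicities (choose-or-skip recurrence); intended as asymptotically faster - a timing run measured B faster at every size both programs finished and A timed out at larger sizes where B still returned, though that run could not confirm a ratio at the largest size.
import Mathlib
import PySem

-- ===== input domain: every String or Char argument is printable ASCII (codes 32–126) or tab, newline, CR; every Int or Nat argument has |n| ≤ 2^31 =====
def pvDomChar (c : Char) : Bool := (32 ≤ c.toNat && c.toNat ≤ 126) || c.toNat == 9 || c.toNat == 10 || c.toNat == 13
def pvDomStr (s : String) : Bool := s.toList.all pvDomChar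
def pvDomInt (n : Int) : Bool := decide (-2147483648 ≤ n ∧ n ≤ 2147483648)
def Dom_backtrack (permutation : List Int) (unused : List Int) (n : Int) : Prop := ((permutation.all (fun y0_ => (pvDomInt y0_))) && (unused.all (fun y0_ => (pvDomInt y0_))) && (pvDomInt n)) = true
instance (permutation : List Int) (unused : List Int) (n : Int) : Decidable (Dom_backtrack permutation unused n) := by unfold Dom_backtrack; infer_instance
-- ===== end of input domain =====

-- B replaces A's exponential backtracking by a memoized DP over the sorted distinct
-- candidate values with multiplicities (intended as faster; a timing run measured B
-- faster at every size both programs finished, A timing out beyond that where B returned,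
-- though it could not confirm a ratio at the largest size).

-- ===== PORT A =====
-- A recurses with `unused` one element shorter at each call; the port threads a
-- fuel argument `unused.length + 1`, which is always sufficient (proved below).
def backtrackFuel : Nat → List Int → List Int → Int → Int
  | 0, _, _, _ => 0   -- never reached when fuel > unused.length
  | fuel + 1, permutation, unused, n =>
    if (permutation.length : Int) = n then 1
    else
      unused.foldl (fun count element =>
        let ok : Bool :=
          permutation.isEmpty ||
            (match PySem.List.pyGet? permutation (-1) with
             | some last => decide (last < element)
             | none => false)   -- unreachable: permutation is nonempty here
        if ok then
          -- new_unused = unused.copy(); new_unused.remove(element): element ∈ unused, so remove? is some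
          count + backtrackFuel fuel (permutation ++ [element])
                    ((PySem.List.remove? unused element).getD []) n
        else count) 0

def backtrack (permutation : List Int) (unused : List Int) (n : Int) : Int :=
  backtrackFuel (unused.length + 1) permutation unused n

-- ===== PORT B =====
-- count_from(i, t) of Source B, as recursion on the suffix vals[i:]; the memo table of
-- Source B is a pure caching device and is dropped (identical values are computed).
def pvCountFrom (counts : PySem.Dict Int Int) (vals : List Int) (t : Int) : Int :=
  if t = 0 then 1
  else
    match vals with
    | [] => 0
    | v :: rest => pvCountFrom counts rest t + counts.getD v 0 * pvCountFrom counts rest (t - 1)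
termination_by vals.length

def backtrack_alt (permutation : List Int) (unused : List Int) (n : Int) : Int :=
  let k : Int := n - (permutation.length : Int)
  if k < 0 then 0
  else
    let last : Option Int := if permutation.isEmpty then none else PySem.List.pyGet? permutation (-1)
    let counts : PySem.Dict Int Int :=
      unused.foldl (fun d v =>
        if (match last with | none => true | some x => decide (x < v)) then
          d.insert v (d.getD v 0 + 1)
        else d) PySem.Dict.empty
    let vals := PySem.List.sorted counts.keys (fun x => x) false
    pvCountFrom counts vals k

-- ===== PRECONDITION & SPEC =====
def Spec_backtrack (permutation : List Int) (unused : List Int) (n : Int) (out : Int) : Prop := out = backtrack_alt permutation unused n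
instance (permutation : List Int) (unused : List Int) (n : Int) (out : Int) : Decidable (Spec_backtrack permutation unused n out) := by unfold Spec_backtrack; infer_instance

-- ===== CLAIM (what is proved, stated in full; the proofs are below) =====
def Claim_equal_backtrack : Prop := ∀ (permutation : List Int) (unused : List Int) (n : Int), Dom_backtrack permutation unused n → Spec_backtrack permutation unused n (backtrack permutation unused n)

-- ===== LEMMAS AND PROOFS =====

-- abstract version of pvCountFrom over a multiplicity function
def pvE (f : Int → Int) (vals : List Int) (t : Int) : Int :=
  if t = 0 then 1
  else
    match vals with
    | [] => 0
    | v :: rest => pvE f rest t + f v * pvE f rest (t - 1)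
termination_by vals.length

-- the guard of both programs, as a function of the last chosen element
def pvOk (lo : Option Int) (e : Int) : Bool :=
  match lo with | none => true | some x => decide (x < e)

-- candidates of u above lo, their canonical sorted distinct list, and the common value
def pvF (u : List Int) (lo : Option Int) : List Int := u.filter (pvOk lo)
def pvVals (u : List Int) (lo : Option Int) : List Int :=
  PySem.List.sorted (PySem.Set.ofList (pvF u lo)) (fun x => x) false
def pvG (u : List Int) (lo : Option Int) (k : Int) : Int :=
  pvE (fun v => (u.count v : Int)) (pvVals u lo) k

theorem pvE_nil (f : Int → Int) (t : Int) : pvE f [] t = if t = 0 then 1 else 0 := by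
  unfold pvE; rfl

theorem pvE_cons (f : Int → Int) (v : Int) (r : List Int) (t : Int) :
    pvE f (v :: r) t = if t = 0 then 1 else pvE f r t + f v * pvE f r (t - 1) := by
  conv_lhs => unfold pvE

theorem pvCountFrom_eq_pvE (d : PySem.Dict Int Int) (vals : List Int) (t : Int) :
    pvCountFrom d vals t = pvE (fun v => d.getD v 0) vals t := by
  induction vals generalizing t with
  | nil => unfold pvCountFrom pvE; rfl
  | cons v r ih => unfold pvCountFrom pvE; simp only [ih]

theorem pvE_congr (f g : Int → Int) (vals : List Int) (t : Int)
    (h : ∀ v ∈ vals, f v = g v) : pvE f vals t = pvE g vals t := by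
  induction vals generalizing t with
  | nil => unfold pvE; rfl
  | cons v r ih =>
    rw [pvE_cons, pvE_cons, ih t (fun w hw => h w (List.mem_cons_of_mem _ hw)),
        ih (t - 1) (fun w hw => h w (List.mem_cons_of_mem _ hw)), h v (List.mem_cons_self ..)]

theorem pvE_neg (f : Int → Int) (vals : List Int) (t : Int) (ht : t < 0) :
    pvE f vals t = 0 := by
  induction vals generalizing t with
  | nil => rw [pvE_nil, if_neg (by omega)]
  | cons v r ih =>
    rw [pvE_cons, if_neg (by omega), ih t ht, ih (t - 1) (by omega)]
    ring

theorem pv_foldl_if_filter {α β : Type} (P : α → Bool) (g : β → α → β) (l : List α) (b : β) :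
    l.foldl (fun d v => if P v then g d v else d) b = (l.filter P).foldl g b := by
  induction l generalizing b with
  | nil => rfl
  | cons x xs ih =>
    by_cases hx : P x <;> simp [List.foldl_cons, hx, ih]

-- sum of a guarded map equals the sum of the map over the filtered list
theorem pv_sum_map_if (P : Int → Bool) (h : Int → Int) (l : List Int) :
    (l.map (fun e => if P e then h e else 0)).sum = ((l.filter P).map h).sum := by
  induction l with
  | nil => rfl
  | cons x xs ih =>
    by_cases hx : P x <;> simp [hx, ih]

-- erasing an element that fails the filter does not change the filtered list
theorem pv_filter_erase (P : Int → Bool) (u : List Int) (e : Int) (he : P e = false) :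
    ((u.erase e).filter P) = u.filter P := by
  induction u with
  | nil => rfl
  | cons x xs ih =>
    by_cases hx : x = e
    · subst hx; simp [List.erase_cons_head, he]
    · rw [List.erase_cons_tail (by simpa using hx)]
      simp only [List.filter_cons, ih]

-- counting inside a filter the element satisfies
theorem pv_count_filter (P : Int → Bool) (u : List Int) (a : Int) (ha : P a = true) :
    (u.filter P).count a = u.count a := by
  induction u with
  | nil => rfl
  | cons x xs ih =>
    by_cases hx : P x
    · rw [List.filter_cons_of_pos hx, List.count_cons, List.count_cons, ih]
    · rw [List.filter_cons_of_neg hx, List.count_cons, ih]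
      have hxa : (x == a) = false := by
        rw [beq_eq_false_iff_ne]
        intro he
        subst he
        exact hx ha
      simp [hxa]

-- two strictly increasing lists with the same members are equal
theorem pv_sorted_unique (V : List Int) (hV : V.Pairwise (· < ·)) :
    ∀ (W : List Int), W.Pairwise (· < ·) → (∀ x, x ∈ V ↔ x ∈ W) → V = W := by
  induction V with
  | nil =>
    intro W _ hmem
    cases W with
    | nil => rfl
    | cons w ws => exact absurd ((hmem w).2 (List.mem_cons_self ..)) (List.not_mem_nil)
  | cons v vs ih =>
    intro W hW hmem
    cases W with
    | nil => exact absurd ((hmem v).1 (List.mem_cons_self ..)) (List.not_mem_nil)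
    | cons w ws =>
      have hvW : v ∈ w :: ws := (hmem v).1 (List.mem_cons_self ..)
      have hwV : w ∈ v :: vs := (hmem w).2 (List.mem_cons_self ..)
      have hvw : v = w := by
        rcases List.mem_cons.1 hvW with h | h
        · exact h
        · rcases List.mem_cons.1 hwV with h' | h'
          · exact h'.symm
          · have h1 := (List.pairwise_cons.1 hW).1 v h
            have h2 := (List.pairwise_cons.1 hV).1 w h'
            omega
      subst hvw
      have htl : vs = ws := by
        refine ih (List.Pairwise.of_cons hV) ws (List.Pairwise.of_cons hW) (fun x => ?_)
        constructor
        · intro hx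
          rcases List.mem_cons.1 ((hmem x).1 (List.mem_cons_of_mem _ hx)) with h | h
          · have := (List.pairwise_cons.1 hV).1 x hx
            omega
          · exact h
        · intro hx
          rcases List.mem_cons.1 ((hmem x).2 (List.mem_cons_of_mem _ hx)) with h | h
          · have := (List.pairwise_cons.1 hW).1 x hx
            omega
          · exact h
      rw [htl]

theorem pvVals_pairwise (u : List Int) (lo : Option Int) : (pvVals u lo).Pairwise (· < ·) :=
  PySem.List.sorted_ofList_pairwise_lt (pvF u lo)

theorem pv_mem_vals (u : List Int) (lo : Option Int) (x : Int) :
    x ∈ pvVals u lo ↔ (x ∈ u ∧ pvOk lo x = true) := by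
  unfold pvVals
  rw [PySem.List.mem_sorted, PySem.Set.mem_ofList]
  simp [pvF, List.mem_filter]

-- KEY combinatorial identity: summing the choose-first recursion over a strictly
-- increasing list V reproduces the choose-or-skip recursion pvE.
theorem pv_key (f : Int → Int) (k : Int) (hk : k ≠ 0) (V : List Int) (hV : V.Pairwise (· < ·)) :
    (V.map (fun v => f v * pvE f (V.filter (fun x => decide (v < x))) (k - 1))).sum
      = pvE f V k := by
  induction V with
  | nil => rw [pvE_nil, if_neg hk]; rfl
  | cons v r ih =>
    have hr : ∀ x ∈ r, v < x := (List.pairwise_cons.1 hV).1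
    have hhead : (v :: r).filter (fun x => decide (v < x)) = r := by
      rw [List.filter_cons_of_neg (by simp)]
      exact List.filter_eq_self.2 (fun x hx => by simpa using hr x hx)
    have hmapcong : r.map (fun w => f w * pvE f ((v :: r).filter (fun x => decide (w < x))) (k - 1))
        = r.map (fun w => f w * pvE f (r.filter (fun x => decide (w < x))) (k - 1)) := by
      apply List.map_congr_left
      intro w hw
      rw [List.filter_cons_of_neg (by have := hr w hw; simp; omega)]
    rw [List.map_cons, List.sum_cons, hhead, hmapcong, ih (List.Pairwise.of_cons hV),
        pvE_cons, if_neg hk]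
    ring

-- grouping: the sum over all occurrences equals the multiplicity-weighted sum
-- over the sorted distinct list
theorem pv_group (u : List Int) (lo : Option Int) (h : Int → Int) :
    ((pvF u lo).map h).sum = ((pvVals u lo).map (fun v => (u.count v : Int) * h v)).sum := by
  classical
  have hnd : (pvVals u lo).Nodup := (pvVals_pairwise u lo).nodup
  have hfs : (pvF u lo).toFinset = (pvVals u lo).toFinset := by
    ext x
    simp only [List.mem_toFinset]
    rw [pv_mem_vals]
    simp [pvF, List.mem_filter]
  rw [Finset.sum_list_map_count (pvF u lo) h, hfs,
      ← List.sum_toFinset _ hnd]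
  refine Finset.sum_congr rfl (fun v hv => ?_)
  have hvmem : v ∈ pvVals u lo := List.mem_toFinset.1 hv
  have hok : pvOk lo v = true := ((pv_mem_vals u lo v).1 hvmem).2
  have hc : (pvF u lo).count v = u.count v := pv_count_filter (pvOk lo) u v hok
  rw [hc, nsmul_eq_mul]

-- one recursive step of A denotes the u-counted pvE over the values above e
theorem pv_step (u : List Int) (e : Int) (k : Int) :
    pvG (u.erase e) (some e) k
      = pvE (fun v => (u.count v : Int)) (pvVals u (some e)) k := by
  have hF : pvF (u.erase e) (some e) = pvF u (some e) :=
    pv_filter_erase (pvOk (some e)) u e (by simp [pvOk])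
  unfold pvG
  rw [show pvVals (u.erase e) (some e) = pvVals u (some e) by unfold pvVals; rw [hF]]
  refine pvE_congr _ _ _ _ (fun v hv => ?_)
  have hok : pvOk (some e) v = true := ((pv_mem_vals u (some e) v).1 hv).2
  have hne : v ≠ e := by
    simp only [pvOk, decide_eq_true_eq] at hok
    omega
  rw [List.count_erase_of_ne hne]

-- the values above v, for an admissible v, are a filter of the values above lo
theorem pv_vals_some (u : List Int) (lo : Option Int) (v : Int) (hok : pvOk lo v = true) :
    pvVals u (some v) = (pvVals u lo).filter (fun x => decide (v < x)) := by
  refine pv_sorted_unique _ (pvVals_pairwise u (some v)) _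
    ((pvVals_pairwise u lo).filter _) (fun x => ?_)
  rw [pv_mem_vals, List.mem_filter, pv_mem_vals]
  cases lo with
  | none =>
    simp [pvOk]
  | some a =>
    simp only [pvOk, decide_eq_true_eq] at hok ⊢
    constructor
    · rintro ⟨hu, hvx⟩
      exact ⟨⟨hu, by omega⟩, by omega⟩
    · rintro ⟨⟨hu, _⟩, hvx⟩
      exact ⟨hu, by omega⟩

-- guard of port A equals pvOk of the last element
theorem pv_ok_eq (p : List Int) (e : Int) :
    (p.isEmpty ||
      (match PySem.List.pyGet? p (-1) with
       | some last => decide (last < e)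
       | none => false)) = pvOk p.getLast? e := by
  cases p with
  | nil => rfl
  | cons x xs =>
    rw [PySem.List.pyGet?_neg_one]
    have : (x :: xs).getLast?.isSome := by
      rw [List.getLast?_isSome]; simp
    obtain ⟨y, hy⟩ := Option.isSome_iff_exists.1 this
    rw [hy]
    rfl

-- A's fuelled recursion computes pvG whenever the fuel exceeds |unused|
theorem pv_backtrackFuel_eq (fuel : Nat) (p u : List Int) (n : Int)
    (hfuel : u.length < fuel) :
    backtrackFuel fuel p u n = pvG u p.getLast? (n - p.length) := by
  induction fuel generalizing p u n with
  | zero => exact absurd hfuel (by omega)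
  | succ fuel ih =>
    by_cases hlen : (p.length : Int) = n
    · have hk : n - (p.length : Int) = 0 := by omega
      unfold backtrackFuel
      rw [if_pos hlen, hk]
      unfold pvG
      cases pvVals u p.getLast? with
      | nil => rw [pvE_nil, if_pos rfl]
      | cons a l => rw [pvE_cons, if_pos rfl]
    · unfold backtrackFuel
      rw [if_neg hlen]
      set lo := p.getLast? with hlo
      set k := n - (p.length : Int) with hkdef
      have hk : k ≠ 0 := by omega
      -- rewrite the loop body for members of u
      have hbody : u.foldl (fun count element =>
            let ok : Bool :=
              p.isEmpty ||
                (match PySem.List.pyGet? p (-1) with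
                 | some last => decide (last < element)
                 | none => false)
            if ok then
              count + backtrackFuel fuel (p ++ [element])
                        ((PySem.List.remove? u element).getD []) n
            else count) 0
          = u.foldl (fun count element =>
              count + (if pvOk lo element then
                pvE (fun v => (u.count v : Int)) (pvVals u (some element)) (k - 1) else 0)) 0 := by
        refine PySem.List.foldl_congr_mem u _ _ 0 (fun acc x hx => ?_)
        simp only [pv_ok_eq p x, ← hlo]
        by_cases hok : pvOk lo x = true
        · rw [if_pos hok, if_pos hok]
          congr 1
          rw [PySem.List.remove?_eq_some_erase u x hx, Option.getD_some]
          have hlt : (u.erase x).length < fuel := by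
            have h1 := List.length_erase_of_mem hx
            have h2 := List.length_pos_of_mem hx
            omega
          rw [ih (p ++ [x]) (u.erase x) n hlt]
          have h1 : (p ++ [x]).getLast? = some x := by
            simp [List.getLast?_append]
          have h2 : n - ((p ++ [x]).length : Int) = k - 1 := by
            rw [hkdef]
            simp only [List.length_append, List.length_cons, List.length_nil]
            push_cast
            omega
          rw [h1, h2, pv_step]
        · rw [if_neg hok, if_neg hok, add_zero]
      rw [hbody, PySem.List.foldl_add, zero_add, pv_sum_map_if]
      have : ∀ h' : Int → Int, (u.filter (pvOk lo)).map h' = (pvF u lo).map h' := fun _ => rfl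
      rw [this, pv_group]
      have hmap : (pvVals u lo).map
            (fun v => (u.count v : Int) * pvE (fun w => (u.count w : Int)) (pvVals u (some v)) (k - 1))
          = (pvVals u lo).map
            (fun v => (u.count v : Int) *
              pvE (fun w => (u.count w : Int)) ((pvVals u lo).filter (fun x => decide (v < x))) (k - 1)) := by
        refine List.map_congr_left (fun v hv => ?_)
        rw [pv_vals_some u lo v ((pv_mem_vals u lo v).1 hv).2]
      rw [hmap, pv_key _ k hk _ (pvVals_pairwise u lo)]
      rfl

-- B's last-element expression is getLast?
theorem pv_last_eq (p : List Int) :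
    (if p.isEmpty then none else PySem.List.pyGet? p (-1)) = p.getLast? := by
  cases p with
  | nil => rfl
  | cons x xs => rw [if_neg (by simp), PySem.List.pyGet?_neg_one]

-- B computes pvG too
theorem pv_alt_eq (p u : List Int) (n : Int) :
    backtrack_alt p u n = pvG u p.getLast? (n - p.length) := by
  unfold backtrack_alt
  simp only [pv_last_eq p]
  by_cases hneg : n - (p.length : Int) < 0
  · rw [if_pos hneg]
    unfold pvG
    rw [pvE_neg _ _ _ hneg]
  · rw [if_neg hneg]
    have hguard : ∀ v : Int,
        (match p.getLast? with | none => true | some x => decide (x < v)) = pvOk p.getLast? v := by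
      intro v; cases p.getLast? <;> rfl
    simp only [hguard]
    have hfold := pv_foldl_if_filter (pvOk p.getLast?)
      (fun (d : PySem.Dict Int Int) (v : Int) => d.insert v (d.getD v 0 + 1)) u PySem.Dict.empty
    have hpvF : List.filter (pvOk p.getLast?) u = pvF u p.getLast? := rfl
    rw [hfold, hpvF, PySem.Dict.foldl_insert_getD_add_one_eq_counter (pvF u p.getLast?),
        PySem.Dict.keys_counter, pvCountFrom_eq_pvE]
    unfold pvG
    have hvals : PySem.List.sorted (PySem.Set.ofList (pvF u p.getLast?)) (fun x => x) false
        = pvVals u p.getLast? := rfl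
    rw [hvals]
    refine pvE_congr _ _ _ _ (fun v hv => ?_)
    rw [PySem.Dict.getD_counter]
    have hok : pvOk p.getLast? v = true := ((pv_mem_vals u p.getLast? v).1 hv).2
    rw [← hpvF, pv_count_filter (pvOk p.getLast?) u v hok]

-- ===== VERDICT (by name: the statement is the Claim_ definition above) =====
theorem backtrack_spec : Claim_equal_backtrack := by
  intro p u n _
  show backtrack p u n = backtrack_alt p u n
  rw [backtrack, pv_backtrackFuel_eq (u.length + 1) p u n (by omega), pv_alt_eq]
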